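-- pv_equiv track=rewrite | github.com/PlaygroundXuelin/algox | python/algox/courseSchedule.py | rel_to_adjs
-- ===== SOURCE A (Python) =====
-- def rel_to_adjs(pairs: [[int]]) -> dict[int, [int]]:
--     deps = dict()
--     for pair in pairs:
--         i = pair[0]
--         dep = deps.get(i, None)
--         if dep is None:
--             dep = []
--             deps[i] = dep
--         j = pair[1]
--         dep.append(j)
--         if not j in deps:
--             deps[j] = []
--     return deps
-- ===== SOURCE B (Python) =====
-- def rel_to_adjs(pairs):
--     # key order = first appearance of each node in the flattened (p[0], p[1]) stream;
--     # adjacency list of k = all p[1] with p[0] == k, in original pair order (grouping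
--     # by comprehension instead of incremental dict mutation)
--     nodes = dict.fromkeys(x for p in pairs for x in (p[0], p[1]))
--     return {k: [p[1] for p in pairs if p[0] == k] for k in nodes}
-- ===== Notes on version B (the rewrite author's own statement) =====
-- stated objective: simpler
-- what changed: Replaces A's incremental dict mutation (conditional key creation, aliased in-place list append, membership re-check per pair) by a declarative grouping: dedup the flattened node stream with dict.fromkeys for the key order, then build each adjacency list in one comprehension as all p[1] with p[0]==k.
import Mathlib
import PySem

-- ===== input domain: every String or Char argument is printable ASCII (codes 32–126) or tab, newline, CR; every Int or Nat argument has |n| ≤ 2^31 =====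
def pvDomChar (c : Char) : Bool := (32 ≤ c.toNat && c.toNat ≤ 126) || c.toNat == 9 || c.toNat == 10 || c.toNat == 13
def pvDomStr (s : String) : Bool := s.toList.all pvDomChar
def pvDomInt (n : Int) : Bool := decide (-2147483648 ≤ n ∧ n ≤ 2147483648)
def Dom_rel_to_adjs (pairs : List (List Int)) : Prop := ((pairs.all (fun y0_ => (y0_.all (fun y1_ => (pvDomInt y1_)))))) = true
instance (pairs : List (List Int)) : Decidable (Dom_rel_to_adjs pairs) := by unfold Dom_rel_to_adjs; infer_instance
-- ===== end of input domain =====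

-- B builds the result declaratively — key order = dedup of the flattened node stream,
-- each adjacency list a single comprehension over pairs — instead of A's incremental
-- dict mutation; same return value, no speed claim.

-- ===== PORT A =====
-- loop body of A: conditional key creation for pair[0], aliased append, membership check for pair[1]
def stepA (deps : PySem.Dict Int (List Int)) (pair : List Int) : PySem.Dict Int (List Int) :=
  let i := PySem.List.pyGetD pair 0 0
  let deps := if (deps.get? i).isNone then deps.insert i [] else deps
  let j := PySem.List.pyGetD pair 1 0
  -- dep.append(j): dep aliases the list stored at key i, mutated in place
  let deps := deps.modify i [] (fun dep => dep ++ [j])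
  if deps.contains j then deps else deps.insert j []

def rel_to_adjs (pairs : List (List Int)) : List (Int × List Int) :=
  (pairs.foldl stepA PySem.Dict.empty).items

-- ===== PORT B =====
-- nodes = dict.fromkeys(x for p in pairs for x in (p[0], p[1]))  — ordered dedup of the node stream
def nodeOrder (pairs : List (List Int)) : List Int :=
  PySem.List.dedup (pairs.flatMap (fun p => [PySem.List.pyGetD p 0 0, PySem.List.pyGetD p 1 0]))

-- [p[1] for p in pairs if p[0] == k]
def adjOf (pairs : List (List Int)) (k : Int) : List Int :=
  (pairs.filter (fun p => PySem.List.pyGetD p 0 0 == k)).map (fun p => PySem.List.pyGetD p 1 0)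

-- the dict comprehension {k: … for k in nodes}: its keys (nodes) are distinct, so its
-- items list in insertion order is exactly this map
def rel_to_adjs_alt (pairs : List (List Int)) : List (Int × List Int) :=
  (nodeOrder pairs).map (fun k => (k, adjOf pairs k))

-- ===== PRECONDITION & SPEC =====
-- Pre_ excludes exactly the inputs where A raises IndexError: a pair with fewer than two elements.
def Pre_rel_to_adjs (pairs : List (List Int)) : Prop := ∀ p ∈ pairs, 2 ≤ p.length
instance (pairs : List (List Int)) : Decidable (Pre_rel_to_adjs pairs) := by unfold Pre_rel_to_adjs; infer_instance
def pvWitness_rel_to_adjs : List (List Int) := [[1, 2], [2, 3], [1, 3]]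

def Spec_rel_to_adjs (pairs : List (List Int)) (out : List (Int × List Int)) : Prop := out = rel_to_adjs_alt pairs
instance (pairs : List (List Int)) (out : List (Int × List Int)) : Decidable (Spec_rel_to_adjs pairs out) := by unfold Spec_rel_to_adjs; infer_instance

-- ===== CLAIM (what is proved, stated in full; the proofs are below) =====
def Claim_equal_rel_to_adjs : Prop := ∀ (pairs : List (List Int)), Dom_rel_to_adjs pairs → Pre_rel_to_adjs pairs → Spec_rel_to_adjs pairs (rel_to_adjs pairs)

-- ===== LEMMAS AND PROOFS =====

theorem keys_stepA (d : PySem.Dict Int (List Int)) (p : List Int) :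
    (stepA d p).keys =
      PySem.Set.add (PySem.Set.add d.keys (PySem.List.pyGetD p 0 0)) (PySem.List.pyGetD p 1 0) := by
  unfold stepA
  set i := PySem.List.pyGetD p 0 0 with hi
  set j := PySem.List.pyGetD p 1 0 with hj
  have h1 : (if (d.get? i).isNone then d.insert i [] else d).keys = PySem.Set.add d.keys i := by
    by_cases hg : (d.get? i).isNone
    · have hc : d.contains i = false := by
        rw [PySem.Dict.contains_eq_isSome_get?, Option.isNone_iff_eq_none.mp hg]; rfl
      rw [if_pos hg, PySem.Dict.keys_insert_of_not_contains _ _ hc,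
          PySem.Set.add_of_not_mem
            (fun hm => by rw [(PySem.Dict.contains_iff_mem_keys d i).mpr hm] at hc; cases hc)]
    · have hc : d.contains i = true := by
        rw [PySem.Dict.contains_eq_isSome_get?]
        cases h : d.get? i
        · rw [h] at hg; exact absurd rfl hg
        · rfl
      rw [if_neg hg]
      exact (PySem.Set.add_of_mem ((PySem.Dict.contains_iff_mem_keys d i).mp hc)).symm
  set d1 := if (d.get? i).isNone then d.insert i [] else d with hd1
  have hc1 : d1.contains i = true :=
    (PySem.Dict.contains_iff_mem_keys d1 i).mpr (by rw [h1]; exact (PySem.Set.mem_add _ _ _).mpr (Or.inr rfl))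
  have h2 : (d1.modify i [] (fun dep => dep ++ [j])).keys = PySem.Set.add d.keys i := by
    rw [PySem.Dict.keys_modify, PySem.Dict.keys_insert_of_contains _ _ hc1, h1]
  set d2 := d1.modify i [] (fun dep => dep ++ [j]) with hd2
  by_cases hcj : d2.contains j = true
  · rw [if_pos hcj, h2]
    exact (PySem.Set.add_of_mem (h2.symm ▸ (PySem.Dict.contains_iff_mem_keys d2 j).mp hcj)).symm
  · have hcj' : d2.contains j = false := by simpa using hcj
    have hjm : j ∉ PySem.Set.add d.keys i := fun hm =>
      hcj ((PySem.Dict.contains_iff_mem_keys d2 j).mpr (h2.symm ▸ hm))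
    rw [if_neg hcj, PySem.Dict.keys_insert_of_not_contains _ _ hcj', h2,
        PySem.Set.add_of_not_mem hjm]

theorem getD_stepA (d : PySem.Dict Int (List Int)) (p : List Int) (k : Int) :
    (stepA d p).getD k [] =
      d.getD k [] ++ (if PySem.List.pyGetD p 0 0 = k then [PySem.List.pyGetD p 1 0] else []) := by
  unfold stepA
  set i := PySem.List.pyGetD p 0 0 with hi
  set j := PySem.List.pyGetD p 1 0 with hj
  have h1 : (if (d.get? i).isNone then d.insert i [] else d).getD k [] = d.getD k [] := by
    by_cases hg : (d.get? i).isNone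
    · rw [if_pos hg, PySem.Dict.getD_insert]
      by_cases e : k = i
      · subst e
        rw [PySem.Dict.getD_of_get?_eq_none d _ (Option.isNone_iff_eq_none.mp hg), if_pos rfl]
      · rw [if_neg e]
    · rw [if_neg hg]
  set d1 := if (d.get? i).isNone then d.insert i [] else d with hd1
  have h2 : (d1.modify i [] (fun dep => dep ++ [j])).getD k [] =
      d.getD k [] ++ (if i = k then [j] else []) := by
    rw [PySem.Dict.getD_modify]
    by_cases e : k = i
    · subst e; rw [if_pos rfl, if_pos rfl, h1]
    · rw [if_neg e, if_neg (fun h => e h.symm), h1, List.append_nil]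
  set d2 := d1.modify i [] (fun dep => dep ++ [j]) with hd2
  by_cases hcj : d2.contains j = true
  · rw [if_pos hcj, h2]
  · have hcj' : d2.contains j = false := by simpa using hcj
    rw [if_neg hcj, PySem.Dict.getD_insert]
    by_cases e : k = j
    · subst e
      rw [if_pos rfl, ← h2, PySem.Dict.getD_of_not_contains _ _ hcj']
    · rw [if_neg e, h2]

theorem keys_foldl_stepA (pairs : List (List Int)) (d : PySem.Dict Int (List Int)) :
    (pairs.foldl stepA d).keys =
      PySem.Set.update d.keys
        (pairs.flatMap (fun p => [PySem.List.pyGetD p 0 0, PySem.List.pyGetD p 1 0])) := by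
  induction pairs generalizing d with
  | nil => rw [List.foldl_nil, List.flatMap_nil, PySem.Set.update_nil]
  | cons p rest ih =>
    rw [List.foldl_cons, List.flatMap_cons, ih, keys_stepA]
    rfl

theorem nodup_keys_foldl_stepA (pairs : List (List Int)) (d : PySem.Dict Int (List Int))
    (h : d.keys.Nodup) : (pairs.foldl stepA d).keys.Nodup := by
  induction pairs generalizing d with
  | nil => exact h
  | cons p rest ih =>
    rw [List.foldl_cons]
    exact ih _ (by rw [keys_stepA]; exact PySem.Set.nodup_add _ _ (PySem.Set.nodup_add _ _ h))

theorem getD_foldl_stepA (pairs : List (List Int)) (d : PySem.Dict Int (List Int)) (k : Int) :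
    (pairs.foldl stepA d).getD k [] = d.getD k [] ++ adjOf pairs k := by
  induction pairs generalizing d with
  | nil => simp [adjOf]
  | cons p rest ih =>
    rw [List.foldl_cons, ih, getD_stepA]
    unfold adjOf
    by_cases e : PySem.List.pyGetD p 0 0 = k
    · rw [List.filter_cons_of_pos (by simpa using e), List.map_cons, if_pos e,
          List.append_assoc, List.singleton_append]
    · rw [List.filter_cons_of_neg (by simpa using e), if_neg e, List.append_nil]

-- ===== VERDICT (by name: the statement is the Claim_ definition above) =====
theorem rel_to_adjs_spec : Claim_equal_rel_to_adjs := by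
  intro pairs _ _
  unfold Spec_rel_to_adjs rel_to_adjs rel_to_adjs_alt
  rw [PySem.Dict.items_eq_map_keys _ (nodup_keys_foldl_stepA pairs _ (by rw [PySem.Dict.keys_empty]; exact List.nodup_nil)) [],
      keys_foldl_stepA]
  unfold nodeOrder
  rw [PySem.List.dedup_eq_ofList, PySem.Set.ofList_eq_foldl]
  apply List.map_congr_left
  intro k _
  rw [getD_foldl_stepA, PySem.Dict.getD_empty, List.nil_append]
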